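-- pv_equiv track=rewrite | github.com/jiachao2020/python_suanfa | test.py | cftHireFunc
-- ===== SOURCE A (Python) =====
-- def cftHireFunc(arr):
--     # write code
--     # 判断最小值，最小值大于0则为最大值+1，否则为1
--     arr = list(arr)
--     arr=sorted(arr)
--     tmp=list(range(arr[0],arr[-1]+1))
--     for i in arr:
--         if i in tmp:
--            tmp.remove(i)
--     if len(tmp)==0:
--         if arr[-1]<=0:
--             return 1
--         else: return arr[-1]+1
--     elif tmp[0] <= 0:
--         return 1
--     else:
--         return tmp[0]
-- ===== SOURCE B (Python) =====
-- def cftHireFunc(arr):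
--     # One forward pass over the sorted list with an 'expected' counter;
--     # never builds the range list. Raises IndexError on [] like the original.
--     arr = sorted(arr)
--     expected = arr[0]
--     gap = None
--     for v in arr:
--         if v == expected:
--             expected += 1
--         elif v > expected:
--             gap = expected
--             break
--     if gap is None:
--         return 1 if arr[-1] <= 0 else arr[-1] + 1
--     return 1 if gap <= 0 else gap
-- ===== Notes on version B (the rewrite author's own statement) =====
-- stated objective: faster
-- what changed: Replaces building list(range(min,max+1)) and repeatedly scanning/removing from it (quadratic in the value span) by a single forward scan of the sorted list maintaining an 'expected' counter, recording the first gap.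
import Mathlib
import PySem

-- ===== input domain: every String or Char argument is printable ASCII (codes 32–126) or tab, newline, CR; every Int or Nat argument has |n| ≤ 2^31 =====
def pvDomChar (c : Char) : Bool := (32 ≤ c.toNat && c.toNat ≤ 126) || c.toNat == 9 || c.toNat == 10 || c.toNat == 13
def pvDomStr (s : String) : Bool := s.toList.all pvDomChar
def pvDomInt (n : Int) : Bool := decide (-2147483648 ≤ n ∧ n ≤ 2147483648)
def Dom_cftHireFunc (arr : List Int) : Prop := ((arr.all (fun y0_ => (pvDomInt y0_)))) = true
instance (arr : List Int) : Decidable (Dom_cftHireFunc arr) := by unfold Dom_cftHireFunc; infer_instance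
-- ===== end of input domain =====

-- B replaces A's build-range-then-remove scan by a single pass over the sorted
-- list with an 'expected' counter (asymptotically faster in the value span).

-- ===== PORT A =====
def cftHireFunc (arr : List Int) : Int :=
  let s := PySem.List.sorted arr (fun x => x) false
  match PySem.List.pyGet? s 0, PySem.List.pyGet? s (-1) with
  | some a0, some aLast =>
    let tmp := PySem.List.pyRange a0 (aLast + 1) 1
    let tmp := s.foldl (fun t i => if i ∈ t then (PySem.List.remove? t i).getD t else t) tmp
    match tmp with
    | [] => if aLast ≤ 0 then 1 else aLast + 1
    | t0 :: _ => if t0 ≤ 0 then 1 else t0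
  | _, _ => 0  -- IndexError on empty input (excluded by Pre_)

-- ===== PORT B =====
-- the 'for v in arr' loop of Source B with its 'expected' counter and early break
def findGapB : List Int → Int → Option Int
  | [], _ => none
  | v :: rest, e =>
    if v = e then findGapB rest (e + 1)
    else if v > e then some e
    else findGapB rest e

def cftHireFunc_alt (arr : List Int) : Int :=
  let s := PySem.List.sorted arr (fun x => x) false
  match PySem.List.pyGet? s 0 with
  | none => 0  -- IndexError on empty input (excluded by Pre_)
  | some a0 =>
    match PySem.List.pyGet? s (-1) with
    | none => 0
    | some aLast =>
      match findGapB s a0 with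
      | none => if aLast ≤ 0 then 1 else aLast + 1
      | some g => if g ≤ 0 then 1 else g

-- ===== PRECONDITION & SPEC =====
-- Pre_ excludes only the empty list, on which both Pythons raise IndexError (arr[0]/arr[-1]).
def Pre_cftHireFunc (arr : List Int) : Prop := arr ≠ []
instance (arr : List Int) : Decidable (Pre_cftHireFunc arr) := by unfold Pre_cftHireFunc; infer_instance
def pvWitness_cftHireFunc : List Int := [2, 0, 3]

def Spec_cftHireFunc (arr : List Int) (out : Int) : Prop := out = cftHireFunc_alt arr
instance (arr : List Int) (out : Int) : Decidable (Spec_cftHireFunc arr out) := by unfold Spec_cftHireFunc; infer_instance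

-- ===== CLAIM (what is proved, stated in full; the proofs are below) =====
def Claim_equal_cftHireFunc : Prop := ∀ (arr : List Int), Dom_cftHireFunc arr → Pre_cftHireFunc arr → Spec_cftHireFunc arr (cftHireFunc arr)

-- ===== LEMMAS AND PROOFS =====

-- A's remove loop over a duplicate-free tmp keeps exactly the elements not occurring in l.
theorem foldl_remove_eq_filter (l : List Int) :
    ∀ (tmp : List Int), tmp.Nodup →
      l.foldl (fun t i => if i ∈ t then (PySem.List.remove? t i).getD t else t) tmp
        = tmp.filter (fun x => decide (x ∉ l)) := by
  induction l with
  | nil => intro tmp _; simp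
  | cons i l ih =>
    intro tmp hnd
    simp only [List.foldl_cons]
    by_cases hmem : i ∈ tmp
    · rw [if_pos hmem, PySem.List.remove?_eq_some_erase tmp i hmem, Option.getD_some,
        ih _ (hnd.erase i), List.Nodup.erase_eq_filter hnd, List.filter_filter]
      apply List.filter_congr
      intro x _
      by_cases hx : x = i <;> simp [hx, List.mem_cons]
    · rw [if_neg hmem, ih _ hnd]
      apply List.filter_congr
      intro x hx
      have : x ≠ i := fun h => hmem (h ▸ hx)
      simp [List.mem_cons, this]

-- B's scan over a sorted list computes the head of the filtered range A builds.
theorem findGapB_eq (s : List Int) :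
    ∀ (e : Int), s.Pairwise (· ≤ ·) →
      findGapB s e
        = ((PySem.List.pyRange e ((s.getLast?.getD (e - 1)) + 1) 1).filter
            (fun x => decide (x ∉ s))).head? := by
  induction s with
  | nil =>
    intro e _
    simp [findGapB, PySem.List.pyRange_one_eq_nil (le_refl e)]
  | cons v rest ih =>
    intro e hp
    have hv : ∀ x ∈ rest, v ≤ x := fun x hx => (List.pairwise_cons.mp hp).1 x hx
    have hrest : rest.Pairwise (· ≤ ·) := (List.pairwise_cons.mp hp).2
    cases rest with
    | nil =>
      simp only [List.getLast?_singleton, Option.getD_some]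
      by_cases h1 : v = e
      · subst h1
        simp [findGapB, PySem.List.pyRange_one_singleton]
      · by_cases h2 : e < v
        · rw [show findGapB [v] e = some e by
            simp only [findGapB]; rw [if_neg h1, if_pos (by omega : v > e)]]
          rw [PySem.List.pyRange_one_cons (by omega : e < v + 1)]
          rw [List.filter_cons, if_pos (by simp; omega)]
          simp
        · have : v < e := by omega
          rw [PySem.List.pyRange_one_eq_nil (by omega : v + 1 ≤ e)]
          simp [findGapB, h1, h2]
    | cons w t =>
      obtain ⟨L, hL⟩ : ∃ L, (w :: t).getLast? = some L :=
        ⟨(w :: t).getLast (by simp), List.getLast?_eq_some_getLast (by simp)⟩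
      have hLmem : L ∈ w :: t := by
        obtain ⟨ys, hys⟩ := List.getLast?_eq_some_iff.mp hL
        rw [hys]; simp
      have hvL : v ≤ L := hv L hLmem
      have hgl : (v :: w :: t).getLast? = some L := by
        rw [List.getLast?_cons_cons]; exact hL
      simp only [hgl, Option.getD_some]
      by_cases h1 : v = e
      · subst h1
        rw [show findGapB (v :: w :: t) v = findGapB (w :: t) (v + 1) by
          simp [findGapB]]
        rw [PySem.List.pyRange_one_cons (by omega : v < L + 1)]
        have hvmem : v ∈ v :: w :: t := by simp
        simp only [List.filter_cons]
        rw [if_neg (by simp)]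
        rw [ih (v + 1) hrest, hL, Option.getD_some]
        congr 1
        apply List.filter_congr
        intro x hx
        have hxr : v + 1 ≤ x := (PySem.List.mem_pyRange_one.mp hx).1
        have : x ≠ v := by omega
        simp [List.mem_cons, this]
      · by_cases h2 : e < v
        · rw [show findGapB (v :: w :: t) e = some e by
            simp only [findGapB]; rw [if_neg h1, if_pos (by omega : v > e)]]
          rw [PySem.List.pyRange_one_cons (by omega : e < L + 1)]
          have hnotin : e ∉ v :: w :: t := by
            intro hmem
            rcases List.mem_cons.mp hmem with h | h
            · omega
            · have := hv e h; omega
          rw [List.filter_cons, if_pos (by simpa using hnotin)]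
          simp
        · have hlt : v < e := by omega
          rw [show findGapB (v :: w :: t) e = findGapB (w :: t) e by
            simp only [findGapB]; rw [if_neg h1, if_neg (by omega : ¬ v > e)]]
          rw [ih e hrest, hL, Option.getD_some]
          congr 1
          apply List.filter_congr
          intro x hx
          have hxr : e ≤ x := (PySem.List.mem_pyRange_one.mp hx).1
          have : x ≠ v := by omega
          simp [List.mem_cons, this]

-- ===== VERDICT (by name: the statement is the Claim_ definition above) =====
theorem cftHireFunc_spec : Claim_equal_cftHireFunc := by
  intro arr _ hpre
  unfold Spec_cftHireFunc
  have hsne : PySem.List.sorted arr (fun x => x) false ≠ [] := by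
    intro h
    apply hpre
    have hlen := PySem.List.length_sorted (xs := arr) (key := fun x => x) (rev := false)
    rw [h] at hlen
    exact List.eq_nil_of_length_eq_zero (by simpa using hlen.symm)
  have hpw : (PySem.List.sorted arr (fun x => x) false).Pairwise (· ≤ ·) := by
    have := PySem.List.sorted_pairwise (xs := arr) (key := fun x => x)
    simpa using this
  obtain ⟨hd, tl, hcons⟩ := List.exists_cons_of_ne_nil hsne
  obtain ⟨L, hL⟩ : ∃ L, (hd :: tl).getLast? = some L :=
    ⟨(hd :: tl).getLast (by simp), List.getLast?_eq_some_getLast (by simp)⟩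
  unfold cftHireFunc cftHireFunc_alt
  simp only [hcons, PySem.List.pyGet?_zero_cons, PySem.List.pyGet?_neg_one, hL]
  rw [foldl_remove_eq_filter _ _ (PySem.List.nodup_pyRange_one _ _),
    findGapB_eq _ _ (hcons ▸ hpw), hL, Option.getD_some]
  cases hfil : (PySem.List.pyRange hd (L + 1) 1).filter
      (fun x => decide (x ∉ hd :: tl)) with
  | nil => simp
  | cons t0 rest => simp
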